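-- pv_equiv track=rewrite | github.com/dineshchhantyal/prime-counting | meissel-lehmer_method.py | p2_func
-- ===== SOURCE A (Python) =====
-- def p2_func(x,a,prime_list):
--     new_prime_list = prime_list[a:]
--     count = 0
--     for i in range(len(new_prime_list)):
--         for j in range(i,len(new_prime_list)):
--             if new_prime_list[i] * new_prime_list[j] <= x:
--                 count += 1
--             else:
--                 break
--
--     return count
-- ===== SOURCE B (Python) =====
-- def p2_func(x, a, prime_list):
--     # Diagonal sweep: round d counts the starts i whose whole run
--     # tail[i..i+d] has stayed within x, using a shrinking active set,
--     # instead of A's row-by-row inner scan with break.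
--     tail = prime_list[a:]
--     n = len(tail)
--     count = 0
--     alive = list(range(n))
--     d = 0
--     while alive:
--         alive = [i for i in alive
--                  if i + d < n and tail[i] * tail[i + d] <= x]
--         count += len(alive)
--         d += 1
--     return count
-- ===== Notes on version B (the rewrite author's own statement) =====
-- stated objective: alternative
-- what changed: Replaces A's row-by-row nested scan with early break by a diagonal sweep: round d filters a shrinking active set of start indices whose whole run tail[i..i+d] stays within x and adds its size, so no inner per-row loop remains.
import Mathlib
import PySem

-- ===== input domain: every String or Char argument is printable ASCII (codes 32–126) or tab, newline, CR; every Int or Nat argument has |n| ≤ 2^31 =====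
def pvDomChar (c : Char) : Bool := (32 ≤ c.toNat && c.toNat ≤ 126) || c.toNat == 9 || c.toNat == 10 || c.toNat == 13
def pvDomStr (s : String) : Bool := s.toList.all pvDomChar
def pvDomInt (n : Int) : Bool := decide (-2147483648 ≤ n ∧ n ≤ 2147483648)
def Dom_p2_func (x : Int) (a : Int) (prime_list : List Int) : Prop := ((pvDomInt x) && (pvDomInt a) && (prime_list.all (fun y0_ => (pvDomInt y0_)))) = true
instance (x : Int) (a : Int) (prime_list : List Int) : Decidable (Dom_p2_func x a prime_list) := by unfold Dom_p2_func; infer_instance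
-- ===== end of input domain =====

-- B replaces A's row-by-row inner scan with break by a diagonal sweep: round d
-- keeps the active set of starts whose run tail[i..i+d] has stayed within x and
-- adds its size (objective: alternative algorithm, same worst-case cost).

-- ===== PORT A =====
-- inner 'for j in range(i, len(npl)): … break' loop: state = (count, broken-flag)
def pvInnerA (x : Int) (npl : List Int) (i : Nat) (count : Int) : Int :=
  ((PySem.List.pyRange (i : Int) (PySem.List.len npl) 1).foldl
    (fun (st : Int × Bool) j =>
      if st.2 then st
      else if PySem.List.pyGetD npl (i : Int) 0 * PySem.List.pyGetD npl j 0 ≤ x then (st.1 + 1, false)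
      else (st.1, true)) (count, false)).1

def p2_func (x : Int) (a : Int) (prime_list : List Int) : Int :=
  let new_prime_list := PySem.List.slice prime_list (some a) none
  (List.range new_prime_list.length).foldl (fun count i => pvInnerA x new_prime_list i count) 0

-- ===== PORT B =====
-- body of B's while loop: '[i for i in alive if i + d < n and tail[i]*tail[i+d] <= x]'
def pvStepB (x : Int) (tail : List Int) (d : Nat) (alive : List Nat) : List Nat :=
  alive.filter (fun i => decide (i + d < tail.length) && decide (tail.getD i 0 * tail.getD (i + d) 0 ≤ x))

-- B's 'while alive:' loop; the fuel argument only makes the recursion total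
-- (the initial call below always supplies enough fuel, proved in the lemmas)
def pvLoopB (x : Int) (tail : List Int) : Nat → List Nat → Nat → Int → Int
  | 0, _, _, count => count
  | fuel + 1, alive, d, count =>
      if alive.isEmpty then count
      else
        let alive' := pvStepB x tail d alive
        pvLoopB x tail fuel alive' (d + 1) (count + alive'.length)

def p2_func_alt (x : Int) (a : Int) (prime_list : List Int) : Int :=
  let tail := PySem.List.slice prime_list (some a) none
  pvLoopB x tail (tail.length + 2) (List.range tail.length) 0 0

-- ===== PRECONDITION & SPEC =====
def Spec_p2_func (x : Int) (a : Int) (prime_list : List Int) (out : Int) : Prop := out = p2_func_alt x a prime_list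
instance (x : Int) (a : Int) (prime_list : List Int) (out : Int) : Decidable (Spec_p2_func x a prime_list out) := by unfold Spec_p2_func; infer_instance

-- ===== CLAIM (what is proved, stated in full; the proofs are below) =====
def Claim_equal_p2_func : Prop := ∀ (x : Int) (a : Int) (prime_list : List Int), Dom_p2_func x a prime_list → Spec_p2_func x a prime_list (p2_func x a prime_list)

-- ===== LEMMAS AND PROOFS =====

-- proof-only helper: prefix length as structural recursion on the suffix list
def pvPrefixLen (x : Int) (p : Int) : List Int → Int
  | [] => 0
  | q :: s => if p * q > x then 0 else pvPrefixLen x p s + 1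

theorem pvFold_stuck (x p : Int) (s : List Int) (c : Int) :
    s.foldl (fun (st : Int × Bool) q =>
      if st.2 then st
      else if p * q ≤ x then (st.1 + 1, false) else (st.1, true)) (c, true) = (c, true) := by
  induction s with
  | nil => rfl
  | cons q s ih => simpa using ih

theorem pvFold_prefix (x p : Int) (s : List Int) (c : Int) :
    (s.foldl (fun (st : Int × Bool) q =>
      if st.2 then st
      else if p * q ≤ x then (st.1 + 1, false) else (st.1, true)) (c, false)).1
      = c + pvPrefixLen x p s := by
  induction s generalizing c with
  | nil => simp [pvPrefixLen]
  | cons q s ih =>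
      rw [List.foldl_cons]
      by_cases h : p * q ≤ x
      · simp only [Bool.false_eq_true, if_false, if_pos h]
        rw [ih]
        simp [pvPrefixLen, not_lt.mpr h]
        ring
      · simp only [Bool.false_eq_true, if_false, if_neg h]
        rw [pvFold_stuck]
        simp [pvPrefixLen, lt_of_not_ge h]

theorem pvInnerA_eq (x : Int) (npl : List Int) (i : Nat) (c : Int) :
    pvInnerA x npl i c = c + pvPrefixLen x (npl.getD i 0) (npl.drop i) := by
  unfold pvInnerA
  rw [show (PySem.List.pyRange (i : Int) (PySem.List.len npl) 1).foldl
        (fun (st : Int × Bool) j =>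
          if st.2 then st
          else if PySem.List.pyGetD npl (i : Int) 0 * PySem.List.pyGetD npl j 0 ≤ x then (st.1 + 1, false)
          else (st.1, true)) ((c, false))
      = (npl.drop ((i : Int)).toNat).foldl
        (fun (st : Int × Bool) v =>
          if st.2 then st
          else if PySem.List.pyGetD npl (i : Int) 0 * v ≤ x then (st.1 + 1, false)
          else (st.1, true)) ((c, false))
    from PySem.List.foldl_pyRange_pyGetD npl 0
        (fun (st : Int × Bool) v =>
          if st.2 then st
          else if PySem.List.pyGetD npl (i : Int) 0 * v ≤ x then (st.1 + 1, false)
          else (st.1, true)) ((c, false)) (Int.natCast_nonneg i)]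
  simp [pvFold_prefix]

-- run length of start i, as the length of a takeWhile prefix
def pvRun (x : Int) (tail : List Int) (i : Nat) : Nat :=
  ((tail.drop i).takeWhile (fun q => decide (tail.getD i 0 * q ≤ x))).length

theorem pvPrefixLen_takeWhile (x p : Int) (l : List Int) :
    pvPrefixLen x p l = ((l.takeWhile (fun q => decide (p * q ≤ x))).length : Int) := by
  induction l with
  | nil => rfl
  | cons q s ih =>
      by_cases h : p * q ≤ x
      · simp [pvPrefixLen, not_lt.mpr h, h, ih]
      · simp [pvPrefixLen, lt_of_not_ge h, h]

-- cumulative active sets of B's loop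
def pvA (x : Int) (tail : List Int) : Nat → List Nat
  | 0 => pvStepB x tail 0 (List.range tail.length)
  | d + 1 => pvStepB x tail (d + 1) (pvA x tail d)

theorem pvStepB_nil (x : Int) (tail : List Int) (d : Nat) : pvStepB x tail d [] = [] := rfl

theorem pvA_empty_ge (x : Int) (tail : List Int) (d : Nat) (h : tail.length ≤ d) :
    pvA x tail d = [] := by
  cases d with
  | zero =>
      rw [pvA]
      simp only [pvStepB, List.filter_eq_nil_iff]
      intro i hi
      simp only [List.mem_range] at hi
      omega
  | succ d =>
      rw [pvA]
      simp only [pvStepB, List.filter_eq_nil_iff]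
      intro i _
      have hnd : ¬ (i + (d + 1) < tail.length) := by omega
      simp [hnd]

theorem pvA_empty_mono (x : Int) (tail : List Int) (d e : Nat) (hde : d ≤ e)
    (h : pvA x tail d = []) : pvA x tail e = [] := by
  induction e with
  | zero =>
      have hd0 : d = 0 := by omega
      subst hd0; exact h
  | succ e ih =>
      rcases Nat.lt_or_ge d (e + 1) with hlt | hge
      · have he : pvA x tail e = [] := by
          rcases Nat.lt_or_ge d e with h1 | h1
          · exact ih (by omega)
          · have hd : d = e := by omega
            subst hd; exact h
        rw [pvA, he, pvStepB_nil]
      · have hd : d = e + 1 := by omega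
        subst hd; exact h

-- the loop, started at stage d with the previous active set, adds the remaining sizes
theorem pvLoopB_eq (x : Int) (tail : List Int) :
    ∀ (fuel d : Nat) (prev : List Nat) (count : Int),
      tail.length < d + fuel →
      (prev = if d = 0 then List.range tail.length else pvA x tail (d - 1)) →
      pvLoopB x tail fuel prev d count
        = count + ∑ e ∈ Finset.Ico d tail.length, ((pvA x tail e).length : Int) := by
  intro fuel
  induction fuel with
  | zero =>
      intro d prev count hb _
      rw [Finset.Ico_eq_empty (by omega)]
      simp [pvLoopB]
  | succ fuel ih =>
      intro d prev count hb hprev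
      rw [pvLoopB]
      by_cases hemp : prev.isEmpty
      · rw [if_pos hemp]
        have hprevnil : prev = [] := List.isEmpty_iff.mp hemp
        have hAd : pvA x tail d = [] := by
          cases d with
          | zero =>
              rw [if_pos rfl] at hprev
              have hn : tail.length = 0 := by
                have := hprevnil ▸ hprev
                simpa [List.range_eq_nil] using this.symm
              exact pvA_empty_ge x tail 0 (by omega)
          | succ d =>
              rw [if_neg (by omega)] at hprev
              rw [pvA]
              have hd : pvA x tail (d + 1 - 1) = [] := hprev ▸ hprevnil
              simp only [Nat.add_sub_cancel] at hd
              rw [hd, pvStepB_nil]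
        have hzero : (∑ e ∈ Finset.Ico d tail.length, ((pvA x tail e).length : Int)) = 0 := by
          apply Finset.sum_eq_zero
          intro e he
          simp only [Finset.mem_Ico] at he
          rw [pvA_empty_mono x tail d e he.1 hAd]
          rfl
        rw [hzero]; ring
      · rw [if_neg hemp]
        have hstep : pvStepB x tail d prev = pvA x tail d := by
          cases d with
          | zero => rw [if_pos rfl] at hprev; rw [hprev, pvA]
          | succ d =>
              rw [if_neg (by omega)] at hprev
              simp only [Nat.add_sub_cancel] at hprev
              rw [hprev, pvA]
        simp only [hstep]
        rw [ih (d + 1) (pvA x tail d) _ (by omega) (by simp)]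
        rcases Nat.lt_or_ge d tail.length with hd | hd
        · rw [Finset.sum_eq_sum_Ico_succ_bot hd]
          ring
        · rw [Finset.Ico_eq_empty (by omega), Finset.Ico_eq_empty (by omega)]
          rw [pvA_empty_ge x tail d hd]
          simp

-- the combined predicate the d-th active set filters range n down to
def pvQ (x : Int) (tail : List Int) (d i : Nat) : Bool :=
  decide (i + d < tail.length) &&
    (List.range (d + 1)).all (fun e => decide (tail.getD i 0 * tail.getD (i + e) 0 ≤ x))

theorem pvA_eq_filter (x : Int) (tail : List Int) (d : Nat) :
    pvA x tail d = (List.range tail.length).filter (pvQ x tail d) := by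
  induction d with
  | zero =>
      rw [pvA]
      simp only [pvStepB]
      apply List.filter_congr
      intro i _
      simp [pvQ]
  | succ d ih =>
      rw [pvA]
      simp only [pvStepB, ih, List.filter_filter]
      apply List.filter_congr
      intro i _
      by_cases h : i + (d + 1) < tail.length
      · have h2 : i + d < tail.length := by omega
        simp [pvQ, h, h2, List.range_succ, Bool.and_comm, Bool.and_left_comm, Bool.and_assoc]
      · simp [pvQ, h]

-- generic characterisation of takeWhile-prefix length
theorem pvTakeWhile_lt (p : Int → Bool) :
    ∀ (l : List Int) (d : Nat),
      (d < (l.takeWhile p).length) ↔ (d < l.length ∧ ∀ e, e ≤ d → p (l.getD e 0) = true) := by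
  intro l
  induction l with
  | nil => intro d; simp
  | cons q s ih =>
      intro d
      by_cases hq : p q
      · cases d with
        | zero => simp [hq]
        | succ d =>
            simp only [List.takeWhile_cons, hq]
            constructor
            · intro h
              have hih := (ih d).mp (by simpa using h)
              refine ⟨by simpa using Nat.succ_lt_succ hih.1, ?_⟩
              intro e he
              cases e with
              | zero => simpa using hq
              | succ e => simpa using hih.2 e (by omega)
            · intro ⟨h1, h2⟩
              have hlt : d < (s.takeWhile p).length := (ih d).mpr
                ⟨by simpa using h1, fun e he => by simpa using h2 (e + 1) (by omega)⟩
              simpa using Nat.succ_lt_succ hlt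
      · simp only [List.takeWhile_cons, hq]
        constructor
        · intro h; simp at h
        · intro ⟨_, h2⟩
          exact absurd (by simpa using h2 0 (by omega)) (by simpa using hq)

theorem pvQ_iff_run (x : Int) (tail : List Int) (d i : Nat) (hi : i < tail.length) :
    pvQ x tail d i = decide (d < pvRun x tail i) := by
  have hget : ∀ e : Nat, (tail.drop i).getD e 0 = tail.getD (i + e) 0 := by
    intro e
    simp [List.getD, List.getElem?_drop]
  rw [pvRun]
  by_cases h : d < ((tail.drop i).takeWhile (fun q => decide (tail.getD i 0 * q ≤ x))).length
  · have hc := (pvTakeWhile_lt _ _ _).mp h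
    simp only [decide_eq_true h]
    have hd : i + d < tail.length := by
      have := hc.1
      rw [List.length_drop] at this; omega
    simp only [pvQ, decide_eq_true hd, Bool.true_and, List.all_eq_true]
    intro e he
    simp only [List.mem_range] at he
    have hpe := hc.2 e (by omega)
    rw [hget e] at hpe
    simpa using hpe
  · simp only [decide_eq_false h]
    rw [pvTakeWhile_lt] at h
    push Not at h
    simp only [pvQ, Bool.and_eq_false_iff]
    by_cases hd : i + d < tail.length
    · right
      have h1 : d < (tail.drop i).length := by rw [List.length_drop]; omega
      obtain ⟨e, he, hpe⟩ := h h1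
      simp only [List.all_eq_false]
      refine ⟨e, by simp only [List.mem_range]; omega, ?_⟩
      rw [hget e] at hpe
      simpa using hpe
    · left; simpa using hd

-- list-filter length as a Finset indicator sum
theorem pvFilterLen (p : Nat → Bool) (n : Nat) :
    ((List.range n).filter p).length = ∑ i ∈ Finset.range n, (if p i then 1 else 0) := by
  induction n with
  | zero => simp
  | succ n ih =>
      rw [List.range_succ, List.filter_append, List.length_append, ih, Finset.sum_range_succ]
      by_cases hp : p n <;> simp [hp]

theorem pvSumIte (m n : Nat) :
    (∑ d ∈ Finset.range n, (if d < m then 1 else 0)) = min m n := by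
  induction n with
  | zero => simp
  | succ n ih =>
      rw [Finset.sum_range_succ, ih]
      by_cases hc : n < m <;> simp [hc] <;> omega

theorem pvListSum_range (n : Nat) (f : Nat → Int) :
    ((List.range n).map f).sum = ∑ i ∈ Finset.range n, f i := by
  induction n with
  | zero => simp
  | succ n ih => simp [List.range_succ, Finset.sum_range_succ, ih]

theorem pvRun_le (x : Int) (tail : List Int) (i : Nat) : pvRun x tail i ≤ tail.length := by
  have h1 : pvRun x tail i ≤ (tail.drop i).length :=
    (List.takeWhile_prefix _).length_le
  have h2 : (tail.drop i).length ≤ tail.length := by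
    rw [List.length_drop]; omega
  omega

theorem p2_func_spec' (x : Int) (a : Int) (prime_list : List Int) :
    p2_func x a prime_list = p2_func_alt x a prime_list := by
  simp only [p2_func, p2_func_alt]
  set tail := PySem.List.slice prime_list (some a) none with htail
  -- A side: fold of pvInnerA = sum of per-start run lengths
  have hfold : ∀ (l : List Nat) (c : Int),
      l.foldl (fun count i => pvInnerA x tail i count) c
        = c + (l.map (fun i => pvPrefixLen x (tail.getD i 0) (tail.drop i))).sum := by
    intro l
    induction l with
    | nil => intro c; simp
    | cons i l ih =>
        intro c
        rw [List.foldl_cons, pvInnerA_eq, ih]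
        simp only [List.map_cons, List.sum_cons]
        ring
  rw [hfold, pvListSum_range tail.length]
  have hA : (∑ i ∈ Finset.range tail.length, pvPrefixLen x (tail.getD i 0) (tail.drop i))
      = ((∑ i ∈ Finset.range tail.length, pvRun x tail i : Nat) : Int) := by
    rw [Nat.cast_sum]
    apply Finset.sum_congr rfl
    intro i _
    rw [pvPrefixLen_takeWhile, pvRun]
  -- B side: loop = sum of active-set sizes
  rw [pvLoopB_eq x tail (tail.length + 2) 0 (List.range tail.length) 0 (by omega) (by simp)]
  have hIco : Finset.Ico 0 tail.length = Finset.range tail.length := by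
    rw [Finset.range_eq_Ico]
  rw [hIco]
  have hB : (∑ e ∈ Finset.range tail.length, ((pvA x tail e).length : Int))
      = ((∑ e ∈ Finset.range tail.length, ((List.range tail.length).filter (pvQ x tail e)).length : Nat) : Int) := by
    rw [Nat.cast_sum]
    apply Finset.sum_congr rfl
    intro e _
    rw [pvA_eq_filter]
  -- exchange of summation
  have hswap : (∑ e ∈ Finset.range tail.length, ((List.range tail.length).filter (pvQ x tail e)).length)
      = ∑ i ∈ Finset.range tail.length, pvRun x tail i := by
    have h1 : ∀ e, ((List.range tail.length).filter (pvQ x tail e)).length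
        = ∑ i ∈ Finset.range tail.length, (if pvQ x tail e i then 1 else 0) := fun e => pvFilterLen _ tail.length
    calc (∑ e ∈ Finset.range tail.length, ((List.range tail.length).filter (pvQ x tail e)).length)
        = ∑ e ∈ Finset.range tail.length, ∑ i ∈ Finset.range tail.length, (if pvQ x tail e i then 1 else 0) := by
          exact Finset.sum_congr rfl (fun e _ => h1 e)
      _ = ∑ i ∈ Finset.range tail.length, ∑ e ∈ Finset.range tail.length, (if pvQ x tail e i then 1 else 0) :=
          Finset.sum_comm
      _ = ∑ i ∈ Finset.range tail.length, pvRun x tail i := by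
          apply Finset.sum_congr rfl
          intro i hi
          simp only [Finset.mem_range] at hi
          have hq : ∀ e, (if pvQ x tail e i then 1 else 0)
              = (if e < pvRun x tail i then 1 else 0) := by
            intro e
            rw [pvQ_iff_run x tail e i hi]
            simp
          rw [Finset.sum_congr rfl (fun e _ => hq e), pvSumIte]
          exact Nat.min_eq_left (pvRun_le x tail i)
  rw [hA, hB, hswap]

-- ===== VERDICT (by name: the statement is the Claim_ definition above) =====
theorem p2_func_spec : Claim_equal_p2_func := by
  intro x a pl _
  unfold Spec_p2_func
  exact p2_func_spec' x a pl
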